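-- pv_equiv track=rewrite | github.com/makmura19/new_quamuslms_backend_v3.1_2 | django/school/helpers/pdftable_helper.py | _add_summary_row
-- ===== SOURCE A (Python) =====
-- def _add_summary_row(data, setting):
--     headers = data[0]
--     values = data[1:]
--
--     has_summary = any(any(k in s for k in ["sum", "avg", "count"]) for s in setting)
--     if not has_summary:
--         return data
--
--     summary_row = []
--     for idx, col_setting in enumerate(setting):
--         parts = col_setting.split()
--         col_data = [row[idx] for row in values]
--
--         if any(k in parts for k in ["sum", "avg", "count"]):
--             numeric_values = []
--             for val in col_data:
--                 try:
--                     numeric_values.append(int(str(val).replace(".", "")))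
--                 except:
--                     numeric_values.append(0)
--
--             if "sum" in parts:
--                 value = sum(numeric_values)
--             elif "avg" in parts:
--                 value = (
--                     round(sum(numeric_values) / len(numeric_values))
--                     if numeric_values
--                     else 0
--                 )
--             elif "count" in parts:
--                 value = len(numeric_values)
--             else:
--                 value = ""
--
--             summary_row.append(f"{value:,}".replace(",", "."))
--         else:
--             summary_row.append("")
--
--     return data + [summary_row]
-- ===== SOURCE B (Python) =====
-- # B: same summary-row task, restructured: precompute each column's aggregation kind,
-- # then one row-major accumulation pass, then one formatting pass over the kinds.
-- def _parse(val):
--     try: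
--         return int(str(val).replace(".", ""))
--     except:
--         return 0
--
--
-- def _fmt(value):
--     return f"{value:,}".replace(",", ".")
--
--
-- def _add_summary_row(data, setting):
--     values = data[1:]
--
--     if not any(any(k in s for k in ("sum", "avg", "count")) for s in setting):
--         return data
--
--     agg = []
--     for s in setting:
--         parts = s.split()
--         if "sum" in parts:
--             agg.append("sum")
--         elif "avg" in parts:
--             agg.append("avg")
--         elif "count" in parts:
--             agg.append("count")
--         else:
--             agg.append("")
--
--     sums = [0] * len(setting)
--     count = 0
--     for row in values:
--         count += 1
--         sums = [s + (_parse(row[j]) if kind else 0)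
--                 for j, (kind, s) in enumerate(zip(agg, sums))]
--
--     summary = []
--     for kind, s in zip(agg, sums):
--         if kind == "sum":
--             summary.append(_fmt(s))
--         elif kind == "avg":
--             summary.append(_fmt(round(s / count) if count else 0))
--         elif kind == "count":
--             summary.append(_fmt(count))
--         else:
--             summary.append("")
--     return data + [summary]
-- ===== Notes on version B (the rewrite author's own statement) =====
-- stated objective: alternative
-- what changed: A scans column-major (for each setting column it extracts and re-parses the whole column from the rows); B precomputes each column's aggregation kind, accumulates all column sums and the row count in ONE row-major pass over the rows, and then formats the summary from the accumulators in a final pass over the kinds.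
import Mathlib
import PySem

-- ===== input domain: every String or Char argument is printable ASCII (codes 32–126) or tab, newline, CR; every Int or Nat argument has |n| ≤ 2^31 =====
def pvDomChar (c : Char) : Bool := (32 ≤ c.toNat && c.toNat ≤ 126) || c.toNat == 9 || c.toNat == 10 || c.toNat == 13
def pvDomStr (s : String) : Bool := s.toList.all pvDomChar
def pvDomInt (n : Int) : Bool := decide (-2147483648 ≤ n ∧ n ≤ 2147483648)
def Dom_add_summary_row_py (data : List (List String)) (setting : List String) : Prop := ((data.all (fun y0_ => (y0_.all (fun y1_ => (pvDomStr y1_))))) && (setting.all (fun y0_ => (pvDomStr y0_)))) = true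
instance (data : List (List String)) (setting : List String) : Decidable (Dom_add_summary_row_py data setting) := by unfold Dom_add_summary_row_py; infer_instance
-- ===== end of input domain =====

-- B restructures A's column-major scan (one pass over the rows per setting column) into
-- per-column kind precomputation + ONE row-major accumulation pass + a formatting pass;
-- same return value on Pre_. (Objective: alternative decomposition, same asymptotic cost.)

-- ===== PORT A =====
-- shared Python snippets, ported once and used by both ports:
-- int(str(val).replace(".", "")) with `except: 0` (the only exception int() can raise here is ValueError = ofStr? none)
def parsePy (s : String) : Int := (PySem.Int.ofStr? (PySem.Str.replace s "." "")).getD 0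

-- round-half-even of num/den (den > 0), exact rational arithmetic
def rheI (num den : Int) : Int :=
  let q := PySem.Int.floordiv num den
  let r := num - q * den
  if 2 * r < den then q
  else if den < 2 * r then q + 1
  else if PySem.Int.mod q 2 = 0 then q else q + 1

-- round(float(a/n)) for a, n ≥ 1 with a/n below the float overflow threshold (Pre_ ensures it):
-- stage 1 rounds a/n to the correctly-rounded 53-bit double m·2^(e-52) (as CPython's int.__truediv__ does),
-- stage 2 rounds that double half-to-even to an integer (as round() does). Exact on the stated range.
def floatRoundNat (a n : Nat) : Int :=
  let e0 : Int := (a.log2 : Int) - (n.log2 : Int)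
  let big : Bool :=
    if 0 ≤ e0 then decide (n * 2 ^ e0.toNat ≤ a) else decide (n ≤ a * 2 ^ (-e0).toNat)
  let e : Int := if big then e0 else e0 - 1
  let t : Int := 52 - e
  let m : Int :=
    if 0 ≤ t then rheI ((a : Int) * 2 ^ t.toNat) (n : Int)
    else rheI (a : Int) ((n : Int) * 2 ^ (-t).toNat)
  if 0 ≤ e - 52 then m * 2 ^ (e - 52).toNat else rheI m (2 ^ (52 - e).toNat)

-- round(s / n) for ints s, n (n > 0): CPython's round of the true-division float, modelled exactly
def pyRoundDiv (s n : Int) : Int :=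
  if s = 0 then 0
  else if s < 0 then -(floatRoundNat s.natAbs n.natAbs)
  else floatRoundNat s.natAbs n.natAbs

-- digit grouping of f"{value:,}".replace(",", ".") : '.' every three digits from the right
def group3 (cs : List Char) : List Char :=
  if cs.length ≤ 3 then cs
  else group3 (cs.take (cs.length - 3)) ++ ('.' :: cs.drop (cs.length - 3))
  termination_by cs.length
  decreasing_by simp; omega

def pyCommaFmt (v : Int) : String :=
  if v < 0 then String.ofList ('-' :: group3 (PySem.Int.toChars (-v)))
  else String.ofList (group3 (PySem.Int.toChars v))

def aggKeys : List String := ["sum", "avg", "count"]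

-- the body of A's `for idx, col_setting in enumerate(setting)` loop (the value appended for one column)
def aCell (values : List (List String)) (idx : Int) (col_setting : String) : String :=
  let parts := PySem.Str.split₀ col_setting
  let col_data := values.map (fun row => PySem.List.pyGetD row idx "")  -- row[idx]; Pre_ keeps it in range
  if aggKeys.any (fun k => parts.contains k) then
    let numeric_values := col_data.map parsePy
    let value : Int :=
      if parts.contains "sum" then numeric_values.sum
      else if parts.contains "avg" then
        (if numeric_values ≠ [] then pyRoundDiv numeric_values.sum numeric_values.length else 0)
      else (numeric_values.length : Int)  -- "count"; Python's trailing `value = ""` is dead (guard = same three tests)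
    pyCommaFmt value
  else ""

def add_summary_row_py (data : List (List String)) (setting : List String) : List (List String) :=
  -- headers = data[0] raises IndexError on data = [] (excluded by Pre_) and is otherwise unused
  let values := PySem.List.slice data (some 1) none
  let has_summary := setting.any (fun s => aggKeys.any (fun k => PySem.Str.isIn k s))
  if !has_summary then data
  else
    let summary_row := (PySem.List.enumerate setting).foldl
      (fun acc p => acc ++ [aCell values p.1 p.2]) []
    data ++ [summary_row]

-- ===== PORT B =====
-- Source B helpers: _parse = parsePy, _fmt = pyCommaFmt, round(s/count) = pyRoundDiv (same snippets as in A's source, ported once above)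
-- the body of B's `for s in setting` kind-precomputation loop
def aggOf (s : String) : String :=
  let parts := PySem.Str.split₀ s
  if parts.contains "sum" then "sum"
  else if parts.contains "avg" then "avg"
  else if parts.contains "count" then "count"
  else ""

-- the body of B's `for row in values` accumulation loop
def bStep (agg : List String) (st : Int × List Int) (row : List String) : Int × List Int :=
  (st.1 + 1,
   (PySem.List.enumerate (agg.zip st.2)).map
     (fun q => if q.2.1 ≠ "" then q.2.2 + parsePy (PySem.List.pyGetD row q.1 "") else q.2.2))

-- the body of B's final `for kind, s in zip(agg, sums)` loop
def bCell (count : Int) (p : String × Int) : String :=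
  if p.1 = "sum" then pyCommaFmt p.2
  else if p.1 = "avg" then pyCommaFmt (if count ≠ 0 then pyRoundDiv p.2 count else 0)
  else if p.1 = "count" then pyCommaFmt count
  else ""

def add_summary_row_py_alt (data : List (List String)) (setting : List String) : List (List String) :=
  let values := PySem.List.slice data (some 1) none
  if !(setting.any (fun s => aggKeys.any (fun k => PySem.Str.isIn k s))) then data
  else
    let agg := setting.foldl (fun acc s => acc ++ [aggOf s]) []
    let st := values.foldl (bStep agg) (0, List.replicate setting.length (0 : Int))
    let summary := (agg.zip st.2).map (bCell st.1)
    data ++ [summary]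

-- ===== PRECONDITION & SPEC =====
-- Pre_ excludes ONLY inputs on which A raises: empty data (headers = data[0] → IndexError),
-- rows shorter than the setting when a summary is requested (row[idx] → IndexError), and
-- avg columns whose column sum reaches the float overflow threshold n·(2^1024 − 2^970),
-- where round(sum/len) raises OverflowError.
def Pre_add_summary_row_py (data : List (List String)) (setting : List String) : Prop :=
  data ≠ [] ∧
  ((setting.any (fun s => aggKeys.any (fun k => PySem.Str.isIn k s))) = true →
    ∀ row ∈ data.tail, setting.length ≤ row.length) ∧
  (∀ p ∈ setting.zipIdx, "sum" ∉ PySem.Str.split₀ p.1 → "avg" ∈ PySem.Str.split₀ p.1 →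
    data.tail = [] ∨
    ((data.tail.map (fun row => parsePy (row.getD p.2 ""))).sum).natAbs
      < data.tail.length * (2 ^ 1024 - 2 ^ 970))
instance (data : List (List String)) (setting : List String) : Decidable (Pre_add_summary_row_py data setting) := by unfold Pre_add_summary_row_py; infer_instance

def pvWitness_add_summary_row_py : List (List String) × List String :=
  ([["a", "b"], ["1.234", "x"], ["2", "7"]], ["sum v", "count"])

def Spec_add_summary_row_py (data : List (List String)) (setting : List String) (out : List (List String)) : Prop := out = add_summary_row_py_alt data setting
instance (data : List (List String)) (setting : List String) (out : List (List String)) : Decidable (Spec_add_summary_row_py data setting out) := by unfold Spec_add_summary_row_py; infer_instance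

-- ===== CLAIM (what is proved, stated in full; the proofs are below) =====
def Claim_equal_add_summary_row_py : Prop := ∀ (data : List (List String)) (setting : List String), Dom_add_summary_row_py data setting → Pre_add_summary_row_py data setting → Spec_add_summary_row_py data setting (add_summary_row_py data setting)

-- ===== LEMMAS AND PROOFS =====

theorem enumerate_getElem? {α : Type} (xs : List α) (s : Int) (j : Nat) :
    (PySem.List.enumerate xs s)[j]? = xs[j]?.map (fun x => (s + j, x)) := by
  induction xs generalizing s j with
  | nil => simp [PySem.List.enumerate_nil]
  | cons x xs ih =>
    cases j with
    | zero => simp [PySem.List.enumerate_cons]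
    | succ j =>
      simp only [PySem.List.enumerate_cons, List.getElem?_cons_succ, ih]
      rw [show s + 1 + (j : Int) = s + (j + 1 : Nat) by push_cast; ring]

-- per-column sum of the parsed cells
def colSum (values : List (List String)) (j : Nat) : Int :=
  (values.map (fun row => parsePy (PySem.List.pyGetD row (j : Int) ""))).sum

theorem bStep_len (agg : List String) (st : Int × List Int) (row : List String)
    (h : st.2.length = agg.length) : (bStep agg st row).2.length = agg.length := by
  simp [bStep, h]

theorem enumerate_getElem {α : Type} (xs : List α) (s : Int) (j : Nat) (h : j < xs.length) :
    (PySem.List.enumerate xs s)[j]'(by rw [PySem.List.length_enumerate]; exact h) = (s + j, xs[j]) := by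
  have h2 : j < (PySem.List.enumerate xs s).length := by rw [PySem.List.length_enumerate]; exact h
  have := enumerate_getElem? xs s j
  rw [List.getElem?_eq_getElem h2, List.getElem?_eq_getElem h] at this
  simpa using this

theorem bStep_get (agg : List String) (st : Int × List Int) (row : List String)
    (h : st.2.length = agg.length) (j : Nat) (hj : j < agg.length) :
    (bStep agg st row).2[j]? =
      some (if agg.getD j "" ≠ "" then st.2.getD j 0 + parsePy (PySem.List.pyGetD row (j : Int) "") else st.2.getD j 0) := by
  have hlen : j < (bStep agg st row).2.length := by rw [bStep_len agg st row h]; exact hj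
  have hz : j < (agg.zip st.2).length := by simp [List.length_zip]; omega
  have hs : j < st.2.length := h ▸ hj
  rw [List.getElem?_eq_getElem hlen]
  simp only [bStep, List.getElem_map, enumerate_getElem (agg.zip st.2) 0 j hz, List.getElem_zip,
    zero_add, List.getD_eq_getElem agg "" hj, List.getD_eq_getElem st.2 0 hs]

theorem bFold_fst (agg : List String) (vals : List (List String)) (c0 : Int) (sums : List Int) :
    (vals.foldl (bStep agg) (c0, sums)).1 = c0 + vals.length := by
  induction vals generalizing c0 sums with
  | nil => simp
  | cons v vs ih =>
    rw [List.foldl_cons]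
    have hpair : bStep agg (c0, sums) v = (c0 + 1, (bStep agg (c0, sums) v).2) := rfl
    rw [hpair, ih]
    simp only [List.length_cons]
    push_cast
    omega

theorem bFold_len (agg : List String) (vals : List (List String)) (c0 : Int) (sums : List Int)
    (h : sums.length = agg.length) :
    (vals.foldl (bStep agg) (c0, sums)).2.length = agg.length := by
  induction vals generalizing c0 sums with
  | nil => simpa using h
  | cons v vs ih =>
    rw [List.foldl_cons]
    have hpair : bStep agg (c0, sums) v = ((bStep agg (c0, sums) v).1, (bStep agg (c0, sums) v).2) := rfl
    rw [hpair]
    exact ih _ _ (bStep_len agg (c0, sums) v h)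

theorem bFold_get (agg : List String) (vals : List (List String)) (c0 : Int) (sums : List Int)
    (h : sums.length = agg.length) (j : Nat) (hj : j < agg.length) :
    (vals.foldl (bStep agg) (c0, sums)).2[j]? =
      some (sums.getD j 0 + if agg.getD j "" ≠ "" then colSum vals j else 0) := by
  induction vals generalizing c0 sums with
  | nil =>
    have hs : j < sums.length := h ▸ hj
    rw [List.foldl_nil, List.getElem?_eq_getElem hs, List.getD_eq_getElem sums 0 hs]
    simp [colSum]
  | cons v vs ih =>
    have h' : (bStep agg (c0, sums) v).2.length = agg.length := bStep_len agg (c0, sums) v h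
    rw [List.foldl_cons]
    have hpair : bStep agg (c0, sums) v = ((bStep agg (c0, sums) v).1, (bStep agg (c0, sums) v).2) := rfl
    rw [hpair, ih _ _ h']
    have hbs := bStep_get agg (c0, sums) v h j hj
    have hlen : j < (bStep agg (c0, sums) v).2.length := h' ▸ hj
    rw [List.getElem?_eq_getElem hlen] at hbs
    rw [← List.getD_eq_getElem (bStep agg (c0, sums) v).2 0 hlen] at hbs
    rw [Option.some.inj hbs]
    by_cases ha : agg.getD j "" = ""
    · simp only [ha]
      simp
    · simp only [ha, ne_eq, not_false_iff, if_true]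
      have : colSum (v :: vs) j = parsePy (PySem.List.pyGetD v (j : Int) "") + colSum vs j := by
        simp [colSum]
      rw [this]; ring_nf

-- one column: A's cell equals B's cell fed with the accumulated (sum, count) of that column
theorem cell_eq (values : List (List String)) (s : String) (j : Nat) :
    aCell values (j : Int) s =
      bCell (values.length : Int) (aggOf s, if aggOf s ≠ "" then colSum values j else 0) := by
  unfold aCell bCell aggOf
  by_cases hs : "sum" ∈ PySem.Str.split₀ s
  · simp [hs, aggKeys, colSum, List.map_map, Function.comp_def]
  · by_cases ha : "avg" ∈ PySem.Str.split₀ s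
    · by_cases hv : values = []
      · subst hv; simp [hs, ha, aggKeys]
      · have hlen0 : values.length ≠ 0 := by simpa [List.length_eq_zero_iff] using hv
        have hlen' : ((values.length : Int)) ≠ 0 := by exact_mod_cast hlen0
        simp [hs, ha, aggKeys, colSum, List.map_map, Function.comp_def, hv]
    · by_cases hcnt : "count" ∈ PySem.Str.split₀ s
      · simp [hs, ha, hcnt, aggKeys]
      · simp [hs, ha, hcnt, aggKeys]

theorem summary_eq (data : List (List String)) (setting : List String) :
    (PySem.List.enumerate setting).map (fun p => aCell data.tail p.1 p.2) =
      ((setting.map aggOf).zip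
        (data.tail.foldl (bStep (setting.map aggOf)) ((0 : Int), List.replicate setting.length (0 : Int))).2).map
        (bCell (data.tail.foldl (bStep (setting.map aggOf)) ((0 : Int), List.replicate setting.length (0 : Int))).1) := by
  have hrep : (List.replicate setting.length (0 : Int)).length = (setting.map aggOf).length := by simp
  have hsums := bFold_len (setting.map aggOf) data.tail 0 (List.replicate setting.length (0 : Int)) hrep
  have hcnt := bFold_fst (setting.map aggOf) data.tail 0 (List.replicate setting.length (0 : Int))
  apply List.ext_getElem
  · simp [PySem.List.length_enumerate, List.length_zip, hsums]
  · intro j h1 h2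
    have hj : j < setting.length := by
      simpa [PySem.List.length_enumerate] using h1
    have hjagg : j < (setting.map aggOf).length := by simpa using hj
    have hjs : j < (data.tail.foldl (bStep (setting.map aggOf)) ((0 : Int), List.replicate setting.length (0 : Int))).2.length := by
      rw [hsums]; exact hjagg
    have hget := bFold_get (setting.map aggOf) data.tail 0 (List.replicate setting.length (0 : Int)) hrep j hjagg
    rw [List.getElem?_eq_getElem hjs] at hget
    have hval := Option.some.inj hget
    have hzip : j < ((setting.map aggOf).zip
        (data.tail.foldl (bStep (setting.map aggOf)) ((0 : Int), List.replicate setting.length (0 : Int))).2).length := by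
      simp [List.length_zip, hsums]; omega
    rw [List.getElem_map, List.getElem_map, enumerate_getElem setting 0 j hj, List.getElem_zip, hval,
      List.getElem_map]
    have hrep0 : (List.replicate setting.length (0 : Int)).getD j 0 = 0 := by
      rw [List.getD_eq_getElem _ 0 (by simpa using hj), List.getElem_replicate]
    simp only [hcnt, hrep0, zero_add, List.getD_eq_getElem (setting.map aggOf) "" hjagg,
      List.getElem_map]
    exact cell_eq data.tail setting[j] j

-- ===== VERDICT (by name: the statement is the Claim_ definition above) =====
theorem add_summary_row_py_spec : Claim_equal_add_summary_row_py := by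
  intro data setting _ _
  unfold Spec_add_summary_row_py add_summary_row_py add_summary_row_py_alt
  dsimp only
  simp only [PySem.List.slice_from_one]
  cases hc : (setting.any (fun s => aggKeys.any (fun k => PySem.Str.isIn k s))) with
  | true =>
    rw [if_neg (by decide), if_neg (by decide)]
    simp only [PySem.List.foldl_append_singleton_eq_map, List.nil_append]
    rw [summary_eq data setting]
  | false =>
    rw [if_pos (by decide), if_pos (by decide)]
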